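-- pv_equiv track=rewrite | github.com/dagster-io/dagster | python_modules/automation/automation/dagster_docs/docstring_rules/sphinx_filter_rule.py | _is_sphinx_role_issue
-- ===== SOURCE A (Python) =====
-- def _is_sphinx_role_issue(warning_line: str) -> bool:
--     """Check if a warning/error is related to unknown Sphinx roles or directives."""
--     sphinx_roles = [
--         "py:class",
--         "py:func",
--         "py:meth",
--         "py:attr",
--         "py:mod",
--         "py:data",
--         "py:obj",
--         "func",
--         "class",
--         "meth",
--         "attr",
--         "mod",
--         "data",
--         "ref",
--         "doc",
--         "download",
--     ]
--
--     sphinx_directives = [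
--         "literalinclude",
--         "automodule",
--         "autoclass",
--         "autofunction",
--         "toctree",
--         "code-block",
--         "highlight",
--         "note",
--         "warning",
--         "versionadded",
--         "versionchanged",
--         "deprecated",
--         "seealso",
--         "attribute",
--     ]
--
--     # Check for "Unknown interpreted text role" messages
--     if "Unknown interpreted text role" in warning_line:
--         return any(role in warning_line for role in sphinx_roles)
--
--     # Check for "No role entry" messages
--     if "No role entry for" in warning_line:
--         return any(f'"{role}"' in warning_line for role in sphinx_roles)
--
--     # Check for "Trying X as canonical role name" messages
--     if "Trying" in warning_line and "as canonical role name" in warning_line: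
--         return any(f'"{role}"' in warning_line for role in sphinx_roles)
--
--     # Check for "Unknown directive type" messages
--     if "Unknown directive type" in warning_line:
--         return any(f'"{directive}"' in warning_line for directive in sphinx_directives)
--
--     # Check for "No directive entry" messages
--     if "No directive entry for" in warning_line:
--         return any(f'"{directive}"' in warning_line for directive in sphinx_directives)
--
--     # Check for "Trying X as canonical directive name" messages
--     if "Trying" in warning_line and "as canonical directive name" in warning_line:
--         return any(f'"{directive}"' in warning_line for directive in sphinx_directives)
--
--     # Check for directive content warnings (lines that start with ".. directive::")
--     if warning_line.strip().startswith(".. "):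
--         directive_name = warning_line.strip().split("::")[0][3:].strip()
--         if directive_name in sphinx_directives:
--             return True
--
--     # Check for RST syntax warnings that contain Sphinx directive content
--     # Format: "RST syntax: .. directive:: content"
--     if "RST syntax: .. " in warning_line:
--         try:
--             # Extract the directive part after "RST syntax: .. "
--             directive_part = warning_line.split("RST syntax: .. ")[1]
--             directive_name = directive_part.split("::")[0].strip()
--             if directive_name in sphinx_directives:
--                 return True
--         except (IndexError, AttributeError):
--             pass
--
--     # Check for directive option warnings (lines that start with spaces and ":")
--     if warning_line.strip().startswith(":") and any(
--         opt in warning_line for opt in ["caption", "language", "linenos"]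
--     ):
--         return True
--
--     return False
-- ===== SOURCE B (Python) =====
-- def _quoted_segments(s):
--     """Substrings of s lying between consecutive double-quote characters."""
--     segments = []
--     current = None  # None until the first quote; afterwards chars since the last quote
--     for ch in s:
--         if ch == '"':
--             if current is not None:
--                 segments.append("".join(current))
--             current = []
--         elif current is not None:
--             current.append(ch)
--     return segments
--
--
-- def _is_sphinx_role_issue(warning_line: str) -> bool:
--     """Check if a warning/error is related to unknown Sphinx roles or directives."""
--     sphinx_roles = [
--         "py:class", "py:func", "py:meth", "py:attr", "py:mod", "py:data",
--         "py:obj", "func", "class", "meth", "attr", "mod", "data", "ref",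
--         "doc", "download",
--     ]
--     sphinx_directives = [
--         "literalinclude", "automodule", "autoclass", "autofunction",
--         "toctree", "code-block", "highlight", "note", "warning",
--         "versionadded", "versionchanged", "deprecated", "seealso",
--         "attribute",
--     ]
--
--     if "Unknown interpreted text role" in warning_line:
--         return any(role in warning_line for role in sphinx_roles)
--
--     # All remaining uniform messages name the offender in double quotes:
--     # extract the quoted segments once and test membership, instead of
--     # scanning the line for every quoted candidate.
--     quoted = _quoted_segments(warning_line)
--
--     if "No role entry for" in warning_line or (
--         "Trying" in warning_line and "as canonical role name" in warning_line
--     ):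
--         return any(seg in sphinx_roles for seg in quoted)
--
--     if (
--         "Unknown directive type" in warning_line
--         or "No directive entry for" in warning_line
--         or ("Trying" in warning_line and "as canonical directive name" in warning_line)
--     ):
--         return any(seg in sphinx_directives for seg in quoted)
--
--     stripped = warning_line.strip()
--     if stripped.startswith(".. "):
--         if stripped.split("::")[0][3:].strip() in sphinx_directives:
--             return True
--
--     if "RST syntax: .. " in warning_line:
--         if warning_line.split("RST syntax: .. ")[1].split("::")[0].strip() in sphinx_directives:
--             return True
--
--     if stripped.startswith(":") and any(
--         opt in warning_line for opt in ["caption", "language", "linenos"]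
--     ):
--         return True
--
--     return False
-- ===== Notes on version B (the rewrite author's own statement) =====
-- stated objective: alternative
-- what changed: For the five quoted message kinds B extracts the quote-delimited segments of the line once with a single-pass scanner and tests their membership in the role/directive lists, and merges the role-quoted and directive-quoted triggers into two grouped branches, instead of A's six sequential branches each scanning the line for every quoted candidate; the three irregular fallback checks are kept.
import Mathlib
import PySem

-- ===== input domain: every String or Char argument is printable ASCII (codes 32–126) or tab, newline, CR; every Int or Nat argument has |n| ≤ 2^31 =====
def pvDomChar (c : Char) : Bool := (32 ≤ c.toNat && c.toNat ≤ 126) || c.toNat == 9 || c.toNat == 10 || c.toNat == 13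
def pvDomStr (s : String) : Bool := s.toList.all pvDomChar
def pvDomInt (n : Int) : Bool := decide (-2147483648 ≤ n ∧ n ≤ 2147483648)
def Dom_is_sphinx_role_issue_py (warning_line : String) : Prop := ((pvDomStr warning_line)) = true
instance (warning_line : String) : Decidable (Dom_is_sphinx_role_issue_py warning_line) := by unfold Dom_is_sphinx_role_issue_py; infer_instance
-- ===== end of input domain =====

-- B extracts the quote-delimited segments of the line once with a single-pass scanner and
-- tests their membership in the candidate lists, with the quoted triggers merged into two
-- grouped branches; objective: alternative (same cost class, different matching mechanism).

-- shared constant lists (the Python literals in both A and B)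
def pvSphinxRoles : List String :=
  ["py:class", "py:func", "py:meth", "py:attr", "py:mod", "py:data", "py:obj",
   "func", "class", "meth", "attr", "mod", "data", "ref", "doc", "download"]

def pvSphinxDirectives : List String :=
  ["literalinclude", "automodule", "autoclass", "autofunction", "toctree",
   "code-block", "highlight", "note", "warning", "versionadded",
   "versionchanged", "deprecated", "seealso", "attribute"]

-- s.split(sep) for a non-empty literal separator (split? is none only for sep = "")
def pvSplit (s sep : String) : List String := (PySem.Str.split? s sep).getD []

-- f'"{x}"'
def pvQuote (x : String) : String := "\"" ++ x ++ "\""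

-- ===== PORT A =====
def is_sphinx_role_issue_py (warning_line : String) : Bool :=
  if PySem.Str.isIn "Unknown interpreted text role" warning_line then
    pvSphinxRoles.any (fun role => PySem.Str.isIn role warning_line)
  else if PySem.Str.isIn "No role entry for" warning_line then
    pvSphinxRoles.any (fun role => PySem.Str.isIn (pvQuote role) warning_line)
  else if PySem.Str.isIn "Trying" warning_line && PySem.Str.isIn "as canonical role name" warning_line then
    pvSphinxRoles.any (fun role => PySem.Str.isIn (pvQuote role) warning_line)
  else if PySem.Str.isIn "Unknown directive type" warning_line then
    pvSphinxDirectives.any (fun d => PySem.Str.isIn (pvQuote d) warning_line)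
  else if PySem.Str.isIn "No directive entry for" warning_line then
    pvSphinxDirectives.any (fun d => PySem.Str.isIn (pvQuote d) warning_line)
  else if PySem.Str.isIn "Trying" warning_line && PySem.Str.isIn "as canonical directive name" warning_line then
    pvSphinxDirectives.any (fun d => PySem.Str.isIn (pvQuote d) warning_line)
  else if PySem.Str.startswith (PySem.Str.strip warning_line) ".. " &&
      pvSphinxDirectives.contains
        (PySem.Str.strip (PySem.Str.slice
          ((pvSplit (PySem.Str.strip warning_line) "::").headD "") (some 3) none)) then
    true
  else if PySem.Str.isIn "RST syntax: .. " warning_line &&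
      -- split(...)[1]: under the guard the separator occurs, so index 1 exists (the try/except never fires)
      pvSphinxDirectives.contains
        (PySem.Str.strip ((pvSplit (((pvSplit warning_line "RST syntax: .. ").drop 1).headD "") "::").headD "")) then
    true
  else if PySem.Str.startswith (PySem.Str.strip warning_line) ":" &&
      (["caption", "language", "linenos"] : List String).any (fun opt => PySem.Str.isIn opt warning_line) then
    true
  else
    false

-- ===== PORT B =====
-- the scanner's inner state: after a quote has been seen, acc = chars since the last quote
def pvSegsIn : List Char → List Char → List (List Char)
  | [], _ => []
  | c :: rest, acc =>
    if c = '"' then acc :: pvSegsIn rest [] else pvSegsIn rest (acc ++ [c])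

-- _quoted_segments: substrings between consecutive double quotes, one left-to-right pass
def pvSegsOut : List Char → List (List Char)
  | [] => []
  | c :: rest => if c = '"' then pvSegsIn rest [] else pvSegsOut rest

def is_sphinx_role_issue_py_alt (warning_line : String) : Bool :=
  if PySem.Str.isIn "Unknown interpreted text role" warning_line then
    pvSphinxRoles.any (fun role => PySem.Str.isIn role warning_line)
  else
    -- quoted = _quoted_segments(warning_line)  (segments as List Char, candidates via toList)
    let quoted := pvSegsOut warning_line.toList
    if PySem.Str.isIn "No role entry for" warning_line ||
       (PySem.Str.isIn "Trying" warning_line && PySem.Str.isIn "as canonical role name" warning_line) then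
      quoted.any (fun seg => (pvSphinxRoles.map String.toList).contains seg)
    else if PySem.Str.isIn "Unknown directive type" warning_line ||
        PySem.Str.isIn "No directive entry for" warning_line ||
        (PySem.Str.isIn "Trying" warning_line && PySem.Str.isIn "as canonical directive name" warning_line) then
      quoted.any (fun seg => (pvSphinxDirectives.map String.toList).contains seg)
    else if PySem.Str.startswith (PySem.Str.strip warning_line) ".. " &&
        pvSphinxDirectives.contains
          (PySem.Str.strip (PySem.Str.slice
            ((pvSplit (PySem.Str.strip warning_line) "::").headD "") (some 3) none)) then
      true
    else if PySem.Str.isIn "RST syntax: .. " warning_line &&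
        pvSphinxDirectives.contains
          (PySem.Str.strip ((pvSplit (((pvSplit warning_line "RST syntax: .. ").drop 1).headD "") "::").headD "")) then
      true
    else if PySem.Str.startswith (PySem.Str.strip warning_line) ":" &&
        (["caption", "language", "linenos"] : List String).any (fun opt => PySem.Str.isIn opt warning_line) then
      true
    else
      false

-- ===== PRECONDITION & SPEC =====
def Spec_is_sphinx_role_issue_py (warning_line : String) (out : Bool) : Prop := out = is_sphinx_role_issue_py_alt warning_line
instance (warning_line : String) (out : Bool) : Decidable (Spec_is_sphinx_role_issue_py warning_line out) := by unfold Spec_is_sphinx_role_issue_py; infer_instance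

-- ===== CLAIM (what is proved, stated in full; the proofs are below) =====
def Claim_equal_is_sphinx_role_issue_py : Prop := ∀ (warning_line : String), Dom_is_sphinx_role_issue_py warning_line → Spec_is_sphinx_role_issue_py warning_line (is_sphinx_role_issue_py warning_line)

-- ===== LEMMAS AND PROOFS =====

-- membership in the inner-state scanner: t is emitted iff acc completes to a segment
-- closed by the next quote of s, or t is a later fully quoted segment of s
lemma pvSegsIn_mem (t : List Char) (ht : ('"' : Char) ∉ t) :
    ∀ (s acc : List Char),
      (t ∈ pvSegsIn s acc ↔
        (∃ u, t = acc ++ u ∧ ('"' : Char) ∉ u ∧ u ++ ['"'] <+: s) ∨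
        ('"' :: (t ++ ['"'])) <:+: s) := by
  intro s
  induction s with
  | nil =>
    intro acc
    simp [pvSegsIn, List.prefix_nil, List.infix_nil]
  | cons c rest ih =>
    intro acc
    by_cases hc : c = '"'
    · subst hc
      simp only [pvSegsIn, if_true, List.mem_cons]
      rw [ih []]
      constructor
      · rintro (rfl | h)
        · exact Or.inl ⟨[], by simp, by simp, by simp⟩
        · rcases h with ⟨u, rfl, hu, hp⟩ | hinf
          · exact Or.inr ((List.infix_cons_iff).2 (Or.inl (by
              simpa [List.cons_prefix_cons] using hp)))
          · exact Or.inr ((List.infix_cons_iff).2 (Or.inr hinf))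
      · rintro (⟨u, rfl, hu, hp⟩ | hinf)
        · rcases u with _ | ⟨d, u'⟩
          · simp
          · exfalso
            rw [List.cons_append, List.cons_prefix_cons] at hp
            exact hu (hp.1 ▸ List.mem_cons_self)
        · rcases (List.infix_cons_iff).1 hinf with hp | hinf'
          · rw [List.cons_prefix_cons] at hp
            exact Or.inr (Or.inl ⟨t, rfl, ht, hp.2⟩)
          · exact Or.inr (Or.inr hinf')
    · simp only [pvSegsIn, if_neg hc]
      rw [ih (acc ++ [c])]
      constructor
      · rintro (⟨u, rfl, hu, hp⟩ | hinf)
        · exact Or.inl ⟨c :: u, by simp, by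
            intro h; rcases List.mem_cons.1 h with h | h
            · exact hc h.symm
            · exact hu h, by simpa [List.cons_prefix_cons] using hp⟩
        · exact Or.inr ((List.infix_cons_iff).2 (Or.inr hinf))
      · rintro (⟨u, rfl, hu, hp⟩ | hinf)
        · rcases u with _ | ⟨d, u'⟩
          · exfalso
            simp only [List.nil_append, List.cons_prefix_cons] at hp
            exact hc hp.1.symm
          · rw [List.cons_append, List.cons_prefix_cons] at hp
            rcases hp with ⟨rfl, hp'⟩
            exact Or.inl ⟨u', by simp, fun h => hu (List.mem_cons_of_mem _ h), hp'⟩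
        · rcases (List.infix_cons_iff).1 hinf with hp | hinf'
          · exfalso
            rw [List.cons_prefix_cons] at hp
            exact hc hp.1.symm
          · exact Or.inr hinf'

-- "t" occurs quoted in s (t quote-free) iff t is one of the scanned segments
lemma pvSegsOut_mem (t : List Char) (ht : ('"' : Char) ∉ t) :
    ∀ s : List Char, (('"' :: (t ++ ['"'])) <:+: s ↔ t ∈ pvSegsOut s) := by
  intro s
  induction s with
  | nil => simp [pvSegsOut, List.infix_nil]
  | cons c rest ih =>
    by_cases hc : c = '"'
    · subst hc
      simp only [pvSegsOut, if_true]
      rw [pvSegsIn_mem t ht rest []]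
      rw [List.infix_cons_iff]
      constructor
      · rintro (hp | hinf)
        · rw [List.cons_prefix_cons] at hp
          exact Or.inl ⟨t, by simp, ht, hp.2⟩
        · exact Or.inr hinf
      · rintro (⟨u, rfl, hu, hp⟩ | hinf)
        · exact Or.inl (by simpa [List.cons_prefix_cons] using hp)
        · exact Or.inr hinf
    · simp only [pvSegsOut, if_neg hc]
      rw [← ih, List.infix_cons_iff]
      constructor
      · rintro (hp | hinf)
        · exfalso; rw [List.cons_prefix_cons] at hp; exact hc hp.1.symm
        · exact hinf
      · exact Or.inr

-- the branch bodies agree: scanning the line for each quoted candidate equals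
-- testing the scanned segments for membership in the candidate list
lemma pvQuotedAny (cands : List String) (h : ∀ r ∈ cands, ('"' : Char) ∉ r.toList)
    (w : String) :
    cands.any (fun r => PySem.Str.isIn (pvQuote r) w) =
      (pvSegsOut w.toList).any (fun seg => (cands.map String.toList).contains seg) := by
  rw [Bool.eq_iff_iff]
  simp only [List.any_eq_true, PySem.Str.isIn_iff_infix, List.contains_iff_mem,
    List.mem_map]
  constructor
  · rintro ⟨r, hr, hinf⟩
    have : (pvQuote r).toList = '"' :: (r.toList ++ ['"']) := by
      simp [pvQuote, String.toList_append]
    rw [this] at hinf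
    exact ⟨r.toList, (pvSegsOut_mem r.toList (h r hr) w.toList).1 hinf, r, hr, rfl⟩
  · rintro ⟨seg, hseg, r, hr, rfl⟩
    refine ⟨r, hr, ?_⟩
    have : (pvQuote r).toList = '"' :: (r.toList ++ ['"']) := by
      simp [pvQuote, String.toList_append]
    rw [this]
    exact (pvSegsOut_mem r.toList (h r hr) w.toList).2 hseg

lemma pvRoles_quote_free : ∀ r ∈ pvSphinxRoles, ('"' : Char) ∉ r.toList := by decide

lemma pvDirectives_quote_free : ∀ r ∈ pvSphinxDirectives, ('"' : Char) ∉ r.toList := by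
  decide

-- ===== VERDICT (by name: the statement is the Claim_ definition above) =====
theorem is_sphinx_role_issue_py_spec : Claim_equal_is_sphinx_role_issue_py := by
  intro w _
  unfold Spec_is_sphinx_role_issue_py is_sphinx_role_issue_py is_sphinx_role_issue_py_alt
  rw [pvQuotedAny pvSphinxRoles pvRoles_quote_free w,
      pvQuotedAny pvSphinxDirectives pvDirectives_quote_free w]
  split_ifs <;> simp_all
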